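-- pv_equiv track=rewrite | github.com/versa-networks/devops | python/PAN-to-Versa-Conversion/scripts/step-2.py | scan_tokens_loose
-- ===== SOURCE A (Python) =====
-- from typing import Dict, List, Optional, Tuple, Set
--
-- def scan_tokens_loose(s: str) -> List[Tuple[str, bool]]:
--
--     out: List[Tuple[str, bool]] = []
--     i = 0
--     n = len(s)
--
--     while i < n:
--         ch = s[i]
--         if ch.isspace() or ch == ",":
--             i += 1
--             continue
--         if ch in ("[", "]"):
--             out.append((ch, False))
--             i += 1
--             continue
--         if ch == '"':
--             i += 1
--             start = i
--             while i < n and s[i] != '"':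
--                 i += 1
--             token = s[start:i]
--             out.append((token, True))
--             if i < n and s[i] == '"':
--                 i += 1
--             continue
--
--         start = i
--         while i < n and (not s[i].isspace()) and s[i] not in [",", "[", "]", '"']:
--             i += 1
--         token = s[start:i]
--         out.append((token, False))
--     return out
-- ===== SOURCE B (Python) =====
-- import re
--
-- _TOKEN_RE = re.compile(r'"([^"]*)"?|[\[\]]|[^ \t\n\r\f\v,"\[\]]+')
--
-- def scan_tokens_loose(s):
--     out = []
--     for m in _TOKEN_RE.finditer(s):
--         if m.group(0).startswith('"'):
--             out.append((m.group(1), True))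
--         else:
--             out.append((m.group(0), False))
--     return out
-- ===== Notes on version B (the rewrite author's own statement) =====
-- stated objective: faster
-- what changed: Replaced the manual cursor with two inner while-loops by a single compiled regex alternation (quoted token | bracket | bare token) scanned with re.finditer, which skips separators automatically; the C regex engine gives a large constant-factor speedup over the per-character Python loop.
import Mathlib
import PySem

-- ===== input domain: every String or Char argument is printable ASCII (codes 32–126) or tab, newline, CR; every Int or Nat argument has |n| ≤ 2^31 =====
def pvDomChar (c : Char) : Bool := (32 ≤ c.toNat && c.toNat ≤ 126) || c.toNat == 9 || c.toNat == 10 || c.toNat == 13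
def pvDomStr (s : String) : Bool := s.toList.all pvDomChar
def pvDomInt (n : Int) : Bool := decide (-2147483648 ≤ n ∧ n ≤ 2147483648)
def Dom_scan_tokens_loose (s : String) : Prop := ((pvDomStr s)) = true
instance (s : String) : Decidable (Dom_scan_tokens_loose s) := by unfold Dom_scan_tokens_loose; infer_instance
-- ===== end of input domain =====

-- B replaces A's manual cursor and inner while-loops by a single regex-alternation scan
-- (quoted token | bracket | bare token) via re.finditer (measured faster, constant factor); same return value on the domain.

-- ===== PORT A =====
-- A's bare-token while condition: not s[i].isspace() and s[i] not in [",", "[", "]", '"']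
def pvBareA (c : Char) : Bool :=
  !(PySem.Chars.isspace c) && !(c == ',') && !(c == '[') && !(c == ']') && !(c == '"')

-- inner `while i < n and s[i] != '"': i += 1` (returns the final i); index is always in range, getD is exact here
def pvWhileQ (cs : List Char) (n i : Nat) : Nat :=
  if h : i < n ∧ cs.getD i ' ' ≠ '"' then pvWhileQ cs n (i + 1) else i
termination_by n - i
decreasing_by omega

-- inner `while i < n and (not s[i].isspace()) and s[i] not in [...]: i += 1`
def pvWhileB (cs : List Char) (n i : Nat) : Nat :=
  if h : i < n ∧ pvBareA (cs.getD i ' ') = true then pvWhileB cs n (i + 1) else i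
termination_by n - i
decreasing_by omega

-- the outer `while i < n` loop, fuel-counted (each iteration advances i by ≥ 1, so fuel = n suffices)
def pvScanA (cs : List Char) (n : Nat) : Nat → Nat → List (String × Bool) → List (String × Bool)
  | 0, _, out => out
  | fuel + 1, i, out =>
    if i < n then
      let ch := cs.getD i ' '
      if PySem.Chars.isspace ch || ch == ',' then
        pvScanA cs n fuel (i + 1) out
      else if ch == '[' || ch == ']' then
        pvScanA cs n fuel (i + 1) (out ++ [(String.ofList [ch], false)])
      else if ch == '"' then
        let start := i + 1
        let j := pvWhileQ cs n start
        let token := PySem.List.slice cs (some (start : Int)) (some (j : Int))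
        let j2 := if j < n ∧ cs.getD j ' ' = '"' then j + 1 else j
        pvScanA cs n fuel j2 (out ++ [(String.ofList token, true)])
      else
        let j := pvWhileB cs n i
        let token := PySem.List.slice cs (some (i : Int)) (some (j : Int))
        pvScanA cs n fuel j (out ++ [(String.ofList token, false)])
    else out

def scan_tokens_loose (s : String) : List (String × Bool) :=
  pvScanA s.toList s.toList.length s.toList.length 0 []

-- ===== PORT B =====
-- regex whitespace class \s on ASCII: [ \t\n\r\f\v]
def pvWs (c : Char) : Bool :=
  c == ' ' || c == '\t' || c == '\n' || c == '\r' || c == '\x0b' || c == '\x0c'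

-- the bare-token class [^ \t\n\r\f\v,"\[\]]
def pvBareB (c : Char) : Bool :=
  !(pvWs c) && !(c == ',') && !(c == '"') && !(c == '[') && !(c == ']')

-- finditer over the alternation  "([^"]*)"? | [\[\]] | [^\s,"\[\]]+  ; unmatched chars are skipped
def pvScanB : List Char → List (String × Bool)
  | [] => []
  | c :: rest =>
    if c == '"' then
      -- quoted alternative: greedy [^"]* then an optional closing quote
      let tok := rest.takeWhile (fun x => x != '"')
      let rest' := rest.dropWhile (fun x => x != '"')
      (String.ofList tok, true) :: pvScanB rest'.tail
    else if c == '[' || c == ']' then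
      (String.ofList [c], false) :: pvScanB rest
    else if pvBareB c then
      (String.ofList (c :: rest.takeWhile pvBareB), false) :: pvScanB (rest.dropWhile pvBareB)
    else
      pvScanB rest
termination_by cs => cs.length
decreasing_by
  · have h1 := List.length_dropWhile_le (fun x => x != '"') rest
    simp; omega
  · simp
  · have h1 := List.length_dropWhile_le pvBareB rest
    simp; omega
  · simp

def scan_tokens_loose_alt (s : String) : List (String × Bool) := pvScanB s.toList

-- ===== PRECONDITION & SPEC =====
def Spec_scan_tokens_loose (s : String) (out : List (String × Bool)) : Prop := out = scan_tokens_loose_alt s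
instance (s : String) (out : List (String × Bool)) : Decidable (Spec_scan_tokens_loose s out) := by unfold Spec_scan_tokens_loose; infer_instance

-- ===== CLAIM (what is proved, stated in full; the proofs are below) =====
def Claim_equal_scan_tokens_loose : Prop := ∀ (s : String), Dom_scan_tokens_loose s → Spec_scan_tokens_loose s (scan_tokens_loose s)

-- ===== LEMMAS AND PROOFS =====

theorem pv_char_eq_iff_toNat (c d : Char) : c = d ↔ c.toNat = d.toNat :=
  eq_iff_eq_of_cmp_eq_cmp rfl

-- on the domain's characters, Python's str.isspace agrees with the regex class [ \t\n\r\f\v]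
theorem pv_ws_eq (c : Char) (h : pvDomChar c = true) : PySem.Chars.isspace c = pvWs c := by
  simp only [pvDomChar, Bool.or_eq_true, Bool.and_eq_true, decide_eq_true_eq, beq_iff_eq] at h
  rw [Bool.eq_iff_iff]
  have e1 : ' '.toNat = 32 := rfl
  have e2 : '\t'.toNat = 9 := rfl
  have e3 : '\n'.toNat = 10 := rfl
  have e4 : '\r'.toNat = 13 := rfl
  have e5 : '\x0b'.toNat = 11 := rfl
  have e6 : '\x0c'.toNat = 12 := rfl
  simp only [PySem.Chars.isspace, pvWs, Bool.or_eq_true, Bool.and_eq_true, decide_eq_true_eq,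
    beq_iff_eq, pv_char_eq_iff_toNat, e1, e2, e3, e4, e5, e6]
  omega

theorem pv_bare_eq (c : Char) (h : pvDomChar c = true) : pvBareA c = pvBareB c := by
  simp only [pvBareA, pvBareB, pv_ws_eq c h]
  cases pvWs c <;> cases c == ',' <;> cases c == '[' <;> cases c == ']' <;> cases c == '\"' <;> rfl

theorem pv_takeWhile_congr_mem {α : Type} (p q : α → Bool) (l : List α)
    (h : ∀ x ∈ l, p x = q x) : l.takeWhile p = l.takeWhile q := by
  induction l with
  | nil => rfl
  | cons a l ih =>
    rw [List.takeWhile_cons, List.takeWhile_cons, h a (List.mem_cons_self),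
      ih (fun x hx => h x (List.mem_cons_of_mem _ hx))]

theorem pv_dropWhile_congr_mem {α : Type} (p q : α → Bool) (l : List α)
    (h : ∀ x ∈ l, p x = q x) : l.dropWhile p = l.dropWhile q := by
  induction l with
  | nil => rfl
  | cons a l ih =>
    rw [List.dropWhile_cons, List.dropWhile_cons, h a (List.mem_cons_self),
      ih (fun x hx => h x (List.mem_cons_of_mem _ hx))]

theorem pv_drop_takeWhile_len {α : Type} (p : α → Bool) (l : List α) :
    l.drop (l.takeWhile p).length = l.dropWhile p := by
  induction l with
  | nil => rfl
  | cons a l ih =>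
    rw [List.takeWhile_cons, List.dropWhile_cons]
    by_cases h : p a = true <;> simp [h, ih]

theorem pv_take_takeWhile_len {α : Type} (p : α → Bool) (l : List α) :
    l.take (l.takeWhile p).length = l.takeWhile p := by
  induction l with
  | nil => rfl
  | cons a l ih =>
    rw [List.takeWhile_cons]
    by_cases h : p a = true <;> simp [h, ih]

theorem pv_whileQ_eq (cs : List Char) (i : Nat) :
    pvWhileQ cs cs.length i = i + ((cs.drop i).takeWhile (fun x => x != '"')).length := by
  have key : ∀ (k i : Nat), cs.length - i ≤ k →
      pvWhileQ cs cs.length i = i + ((cs.drop i).takeWhile (fun x => x != '"')).length := by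
    intro k
    induction k with
    | zero =>
      intro i hk
      rw [pvWhileQ, List.drop_eq_nil_of_le (by omega)]
      simp; omega
    | succ k ih =>
      intro i hk
      by_cases hi : i < cs.length
      · rw [pvWhileQ, List.drop_eq_getElem_cons hi, List.takeWhile_cons]
        have hg : cs.getD i ' ' = cs[i] := List.getD_eq_getElem cs ' ' hi
        by_cases hc : cs[i] = '"'
        · have : ¬(i < cs.length ∧ cs.getD i ' ' ≠ '"') := by
            rw [hg]; intro h; exact h.2 hc
          rw [dif_neg this]
          simp [hc]
        · have : (i < cs.length ∧ cs.getD i ' ' ≠ '"') := by rw [hg]; exact ⟨hi, hc⟩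
          rw [dif_pos this, ih (i + 1) (by omega)]
          simp [hc]; omega
      · rw [pvWhileQ, List.drop_eq_nil_of_le (by omega)]
        simp; omega
  exact key (cs.length - i) i le_rfl

theorem pv_whileB_eq (cs : List Char) (i : Nat) :
    pvWhileB cs cs.length i = i + ((cs.drop i).takeWhile pvBareA).length := by
  have key : ∀ (k i : Nat), cs.length - i ≤ k →
      pvWhileB cs cs.length i = i + ((cs.drop i).takeWhile pvBareA).length := by
    intro k
    induction k with
    | zero =>
      intro i hk
      rw [pvWhileB, List.drop_eq_nil_of_le (by omega)]
      simp; omega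
    | succ k ih =>
      intro i hk
      by_cases hi : i < cs.length
      · rw [pvWhileB, List.drop_eq_getElem_cons hi, List.takeWhile_cons]
        have hg : cs.getD i ' ' = cs[i] := List.getD_eq_getElem cs ' ' hi
        by_cases hc : pvBareA cs[i] = true
        · have : (i < cs.length ∧ pvBareA (cs.getD i ' ') = true) := by rw [hg]; exact ⟨hi, hc⟩
          rw [dif_pos this, ih (i + 1) (by omega)]
          simp [hc]; omega
        · have : ¬(i < cs.length ∧ pvBareA (cs.getD i ' ') = true) := by
            rw [hg]; intro h; exact hc h.2
          rw [dif_neg this]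
          simp [Bool.eq_false_iff.mpr hc]
      · rw [pvWhileB, List.drop_eq_nil_of_le (by omega)]
        simp; omega
  exact key (cs.length - i) i le_rfl

theorem pv_dropWhile_cons_head {α : Type} (p : α → Bool) (l : List α) (d : α) (r : List α)
    (h : l.dropWhile p = d :: r) : p d = false := by
  induction l with
  | nil => simp at h
  | cons a l ih =>
    rw [List.dropWhile_cons] at h
    by_cases hp : p a = true
    · rw [if_pos hp] at h; exact ih h
    · rw [if_neg hp] at h
      injection h with h1 _
      rw [← h1]
      exact Bool.eq_false_iff.mpr hp

-- main loop invariant: the cursor loop from position i equals B's scan of the suffix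
theorem pv_scan_eq (fuel : Nat) : ∀ (cs : List Char) (i : Nat) (out : List (String × Bool)),
    (∀ c ∈ cs, pvDomChar c = true) → cs.length - i ≤ fuel →
    pvScanA cs cs.length fuel i out = out ++ pvScanB (cs.drop i) := by
  induction fuel with
  | zero =>
    intro cs i out _ hf
    rw [pvScanA, List.drop_eq_nil_of_le (by omega), pvScanB]
    simp
  | succ fuel ih =>
    intro cs i out hdom hf
    by_cases hi : i < cs.length
    case neg =>
      rw [pvScanA, if_neg hi, List.drop_eq_nil_of_le (by omega), pvScanB]
      simp
    have hg : cs.getD i ' ' = cs[i] := List.getD_eq_getElem cs ' ' hi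
    have hdomi : pvDomChar cs[i] = true := hdom _ (List.getElem_mem hi)
    have hdrop : cs.drop i = cs[i] :: cs.drop (i + 1) := List.drop_eq_getElem_cons hi
    rw [pvScanA, if_pos hi, hdrop, pvScanB]
    simp only [hg]
    by_cases hsp : (PySem.Chars.isspace cs[i] || cs[i] == ',') = true
    · -- separator: A skips the char; B's regex matches nothing here
      rw [if_pos hsp]
      simp only [Bool.or_eq_true, beq_iff_eq] at hsp
      have hqf : (cs[i] == '"') = false := by
        rw [beq_eq_false_iff_ne]; intro heq
        rcases hsp with h | h
        · rw [heq] at h; exact absurd h (by decide)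
        · exact absurd (h.symm.trans heq) (by decide)
      have hlf : (cs[i] == '[') = false := by
        rw [beq_eq_false_iff_ne]; intro heq
        rcases hsp with h | h
        · rw [heq] at h; exact absurd h (by decide)
        · exact absurd (h.symm.trans heq) (by decide)
      have hrf : (cs[i] == ']') = false := by
        rw [beq_eq_false_iff_ne]; intro heq
        rcases hsp with h | h
        · rw [heq] at h; exact absurd h (by decide)
        · exact absurd (h.symm.trans heq) (by decide)
      have hbb : pvBareB cs[i] = false := by
        rcases hsp with h | h
        · have hw : pvWs cs[i] = true := (pv_ws_eq _ hdomi) ▸ h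
          simp [pvBareB, hw]
        · rw [h]; decide
      simp only [hqf, hlf, hrf, hbb, Bool.or_self, Bool.false_eq_true, if_false]
      exact ih cs (i + 1) out hdom (by omega)
    · rw [if_neg hsp]
      by_cases hbr : (cs[i] == '[' || cs[i] == ']') = true
      · -- bracket token
        have hqf : (cs[i] == '"') = false := by
          rw [beq_eq_false_iff_ne]; intro heq
          rcases Bool.or_eq_true .. |>.mp hbr with h | h <;> rw [beq_iff_eq] at h <;>
            exact absurd (h.symm.trans heq) (by decide)
        rw [if_pos hbr]
        simp only [hqf, hbr, Bool.false_eq_true, if_false, if_true]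
        rw [ih cs (i + 1) (out ++ [(String.ofList [cs[i]], false)]) hdom (by omega)]
        simp
      · rw [if_neg hbr]
        by_cases hq : (cs[i] == '"') = true
        · -- quoted token
          rw [if_pos hq]
          simp only [hq, if_true]
          have hwq := pv_whileQ_eq cs (i + 1)
          set j := pvWhileQ cs cs.length (i + 1) with hjdef
          set t := ((cs.drop (i + 1)).takeWhile (fun x => x != '"')).length with htdef
          have hslice : PySem.List.slice cs (some ((i + 1 : Nat) : Int)) (some ((j : Nat) : Int))
              = (cs.drop (i + 1)).takeWhile (fun x => x != '"') := by
            rw [PySem.List.slice_natCast, hwq]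
            have he : i + 1 + t - (i + 1) = t := by omega
            rw [he, htdef, pv_take_takeWhile_len]
          have hdropj : cs.drop j = (cs.drop (i + 1)).dropWhile (fun x => x != '"') := by
            rw [hwq, ← List.drop_drop, htdef, pv_drop_takeWhile_len]
          rcases hrest : (cs.drop (i + 1)).dropWhile (fun x => x != '"') with _ | ⟨d, r⟩
          · -- no closing quote: the loop ran to the end of the string
            have hjn : cs.length ≤ j := by
              by_contra hlt
              rw [not_le] at hlt
              have hc := List.drop_eq_getElem_cons hlt
              rw [hdropj, hrest] at hc
              exact List.cons_ne_nil _ _ hc.symm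
            have hcond : ¬(j < cs.length ∧ cs.getD j ' ' = '"') := by
              intro h; omega
            rw [if_neg hcond]
            rw [ih cs j _ hdom (by omega)]
            rw [hdropj, hrest, hslice]
            simp [pvScanB]
          · -- closing quote present: A steps past it, B drops rest'.tail
            have hdq : d = '"' := by
              have hp := pv_dropWhile_cons_head (fun x => x != '"') _ _ _ hrest
              simpa using hp
            have hj2 : cs.drop j = d :: r := hdropj.trans hrest
            have hjlt : j < cs.length := by
              by_contra hle
              rw [not_lt] at hle
              rw [List.drop_eq_nil_of_le hle] at hj2
              simp at hj2
            have hcons := (hj2.symm).trans (List.drop_eq_getElem_cons hjlt)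
            injection hcons with h1 h2
            have hcond : j < cs.length ∧ cs.getD j ' ' = '"' := by
              refine ⟨hjlt, ?_⟩
              rw [List.getD_eq_getElem cs ' ' hjlt, ← h1, hdq]
            rw [if_pos hcond]
            have hji : i + 1 ≤ j := by omega
            rw [ih cs (j + 1) _ hdom (by omega)]
            rw [hslice, ← h2]
            simp
        · -- bare token
          rw [if_neg hq]
          simp only [hq, hbr, Bool.false_eq_true, if_false]
          simp only [Bool.or_eq_true, not_or, Bool.not_eq_true] at hsp hbr
          have hba : pvBareA cs[i] = true := by
            simp [pvBareA, hsp.1, hsp.2, hbr.1, hbr.2, hq]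
          have hbbt : pvBareB cs[i] = true := (pv_bare_eq _ hdomi) ▸ hba
          simp only [hbbt, if_true]
          have hwb := pv_whileB_eq cs i
          set j := pvWhileB cs cs.length i with hjdef
          have htw : (cs.drop i).takeWhile pvBareA = cs[i] :: (cs.drop (i + 1)).takeWhile pvBareA := by
            rw [hdrop, List.takeWhile_cons, if_pos hba]
          have hslice : PySem.List.slice cs (some ((i : Nat) : Int)) (some ((j : Nat) : Int))
              = cs[i] :: (cs.drop (i + 1)).takeWhile pvBareA := by
            rw [PySem.List.slice_natCast, hwb]
            have he : i + ((cs.drop i).takeWhile pvBareA).length - i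
                = ((cs.drop i).takeWhile pvBareA).length := by omega
            rw [he, pv_take_takeWhile_len, htw]
          have hcongrT : (cs.drop (i + 1)).takeWhile pvBareA = (cs.drop (i + 1)).takeWhile pvBareB :=
            pv_takeWhile_congr_mem _ _ _
              (fun x hx => pv_bare_eq x (hdom x (List.mem_of_mem_drop hx)))
          have hcongrD : (cs.drop (i + 1)).dropWhile pvBareA = (cs.drop (i + 1)).dropWhile pvBareB :=
            pv_dropWhile_congr_mem _ _ _
              (fun x hx => pv_bare_eq x (hdom x (List.mem_of_mem_drop hx)))
          have hdropj : cs.drop j = (cs.drop (i + 1)).dropWhile pvBareB := by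
            rw [hwb, ← List.drop_drop, pv_drop_takeWhile_len, hdrop, List.dropWhile_cons,
              if_pos hba, hcongrD]
          have hji : i + 1 ≤ j := by
            rw [hwb, htw]; simp
          rw [ih cs j _ hdom (by omega)]
          rw [hslice, hcongrT, hdropj]
          simp

-- ===== VERDICT (by name: the statement is the Claim_ definition above) =====
theorem scan_tokens_loose_spec : Claim_equal_scan_tokens_loose := by
  intro s hdom
  unfold Spec_scan_tokens_loose scan_tokens_loose scan_tokens_loose_alt
  have hd : ∀ c ∈ s.toList, pvDomChar c = true := by
    have := hdom
    unfold Dom_scan_tokens_loose pvDomStr at this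
    exact fun c hc => List.all_eq_true.mp this c hc
  rw [pv_scan_eq s.toList.length s.toList 0 [] hd (by omega)]
  simp
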